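-- pv_equiv track=rewrite | github.com/byeol-hub/programmers | 프로그래머스/0/181836. 그림 확대/그림 확대.py | solution
-- ===== SOURCE A (Python) =====
-- def solution(picture, k):
--     answer = []
--     a = ''
--     for i in picture:
--         for j in range(k):
--             for x in i:
--                 a += x*k
--             answer.append(a)
--             a = ''
--     return answer
-- ===== SOURCE B (Python) =====
-- def solution(picture, k):
--     answer = []
--     for row in picture:
--         line = ''.join(c * k for c in row)
--         answer += [line] * k
--     return answer
-- ===== Notes on version B (the rewrite author's own statement) =====
-- stated objective: faster
-- what changed: B builds each enlarged line once with ''.join and appends it k times, instead of A rebuilding the same line from scratch inside the k-repeat loop; intended as faster (O(k) fewer line builds), measured ~1.8x at the largest size both finished.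
import Mathlib
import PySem

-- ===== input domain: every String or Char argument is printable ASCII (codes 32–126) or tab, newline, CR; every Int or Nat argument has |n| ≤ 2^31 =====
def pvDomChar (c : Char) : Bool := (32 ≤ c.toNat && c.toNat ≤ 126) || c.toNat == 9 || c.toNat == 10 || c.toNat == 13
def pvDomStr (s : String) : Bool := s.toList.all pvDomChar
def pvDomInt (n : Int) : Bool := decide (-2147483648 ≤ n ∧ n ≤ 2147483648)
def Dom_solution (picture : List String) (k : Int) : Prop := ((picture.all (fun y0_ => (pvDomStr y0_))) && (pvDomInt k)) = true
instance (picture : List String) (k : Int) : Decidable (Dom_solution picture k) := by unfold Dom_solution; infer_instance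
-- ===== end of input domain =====

-- B builds each enlarged line once and appends it k times, instead of rebuilding it inside the k-repeat loop (intended as faster; measured ~1.8x at the largest size both finished).


-- ===== PORT A =====
-- x*k on a one-char string: Python repeats the char k times (empty for k ≤ 0); exact as List.replicate k.toNat
def pvCharRep (k : Int) (x : Char) : String := String.mk (List.replicate k.toNat x)

def solution (picture : List String) (k : Int) : List String :=
  picture.foldl (fun answer i =>
    (PySem.List.pyRange 0 k 1).foldl (fun answer _ =>
      answer ++ [i.toList.foldl (fun a x => a ++ pvCharRep k x) ""]) answer) []

-- ===== PORT B =====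
def solution_alt (picture : List String) (k : Int) : List String :=
  picture.foldl (fun answer row =>
    let line := String.join (row.toList.map (fun c => pvCharRep k c))
    answer ++ List.replicate k.toNat line) []

-- ===== PRECONDITION & SPEC =====
def Spec_solution (picture : List String) (k : Int) (out : List String) : Prop := out = solution_alt picture k
instance (picture : List String) (k : Int) (out : List String) : Decidable (Spec_solution picture k out) := by unfold Spec_solution; infer_instance

-- ===== CLAIM (what is proved, stated in full; the proofs are below) =====
def Claim_equal_solution : Prop := ∀ (picture : List String) (k : Int), Dom_solution picture k → Spec_solution picture k (solution picture k)

-- ===== LEMMAS AND PROOFS =====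

theorem foldl_strcat (l : List String) (s : String) :
    l.foldl (fun r t => r ++ t) s = s ++ l.foldl (fun r t => r ++ t) "" := by
  induction l generalizing s with
  | nil => simp
  | cons a t ih =>
      rw [List.foldl_cons, List.foldl_cons, ih (s ++ a), ih ("" ++ a)]
      simp [String.append_assoc]

-- A's inner character loop (+= concatenation from '') builds exactly the joined line.
theorem foldl_append_join (g : Char → String) (l : List Char) (s : String) :
    l.foldl (fun a x => a ++ g x) s = s ++ String.join (l.map g) := by
  induction l generalizing s with
  | nil => simp [String.join]
  | cons c t ih =>
      rw [List.foldl_cons, ih, List.map_cons,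
        show String.join (g c :: List.map g t)
            = ("" ++ g c) ++ (List.map g t).foldl (fun r t => r ++ t) "" from by
          rw [String.join, List.foldl_cons, foldl_strcat]]
      simp [String.join, String.append_assoc]

-- A's k-repeat loop appends the same (row-independent) line k times.
theorem foldl_append_replicate (r : List Int) (L : String) (ans : List String) :
    r.foldl (fun ans _ => ans ++ [L]) ans = ans ++ List.replicate r.length L := by
  induction r generalizing ans with
  | nil => simp
  | cons a t ih => simp [List.foldl_cons, ih, List.replicate_succ, List.append_assoc]

theorem solution_eq_alt (picture : List String) (k : Int) :
    solution picture k = solution_alt picture k := by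
  unfold solution solution_alt
  have hstep : ∀ (ans : List String) (i : String),
      (PySem.List.pyRange 0 k 1).foldl (fun answer _ =>
        answer ++ [i.toList.foldl (fun a x => a ++ pvCharRep k x) ""]) ans
      = ans ++ List.replicate k.toNat (String.join (i.toList.map (fun c => pvCharRep k c))) := by
    intro ans i
    rw [foldl_append_replicate, PySem.List.length_pyRange_one]
    have : (i.toList.foldl (fun a x => a ++ pvCharRep k x) "")
        = String.join (i.toList.map (fun c => pvCharRep k c)) := by
      rw [foldl_append_join]; simp
    simp [this]
  induction picture using List.reverseRecOn with
  | nil => rfl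
  | append_singleton t i ih =>
      simp only [List.foldl_append, List.foldl_cons, List.foldl_nil] at *
      rw [hstep, ih]

-- ===== VERDICT (by name: the statement is the Claim_ definition above) =====
theorem solution_spec : Claim_equal_solution := by
  intro picture k _
  exact solution_eq_alt picture k
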